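-- pv_equiv track=rewrite | github.com/oVirt/ovirt-ansible-disaster-recovery | files/validator.py | _get_dups
-- ===== SOURCE A (Python) =====
-- def _get_dups(var_file, mapping):
--     _return_set = set()
--     _mapping = var_file.get(mapping)
--     _primary = set()
--     _secondary = set()
--     _return_set.update(set(x['primary_name']
--                            for x in _mapping if
--                            x['primary_name'] in _primary or
--                            _primary.add(x['primary_name'])))
--     _return_set.update(set(x['secondary_name']
--                            for x in _mapping if
--                            x['secondary_name'] in _secondary or
--                            _secondary.add(x['secondary_name'])))
--     return _return_set
-- ===== SOURCE B (Python) =====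
-- def _get_dups(var_file, mapping):
--     _mapping = var_file.get(mapping)
--     _result = set()
--     for _field in ('primary_name', 'secondary_name'):
--         _names = [x[_field] for x in _mapping]
--         _rest = list(_names)
--         for _name in dict.fromkeys(_names):
--             _rest.remove(_name)
--         _result.update(_rest)
--     return _result
-- ===== Notes on version B (the rewrite author's own statement) =====
-- stated objective: alternative
-- what changed: B finds each field's duplicates by multiset subtraction: it deletes one occurrence of every distinct name from the per-field name list and the leftover occurrences are exactly the duplicated names, instead of A's online seen-set membership-or-add generator trick.
import Mathlib
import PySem

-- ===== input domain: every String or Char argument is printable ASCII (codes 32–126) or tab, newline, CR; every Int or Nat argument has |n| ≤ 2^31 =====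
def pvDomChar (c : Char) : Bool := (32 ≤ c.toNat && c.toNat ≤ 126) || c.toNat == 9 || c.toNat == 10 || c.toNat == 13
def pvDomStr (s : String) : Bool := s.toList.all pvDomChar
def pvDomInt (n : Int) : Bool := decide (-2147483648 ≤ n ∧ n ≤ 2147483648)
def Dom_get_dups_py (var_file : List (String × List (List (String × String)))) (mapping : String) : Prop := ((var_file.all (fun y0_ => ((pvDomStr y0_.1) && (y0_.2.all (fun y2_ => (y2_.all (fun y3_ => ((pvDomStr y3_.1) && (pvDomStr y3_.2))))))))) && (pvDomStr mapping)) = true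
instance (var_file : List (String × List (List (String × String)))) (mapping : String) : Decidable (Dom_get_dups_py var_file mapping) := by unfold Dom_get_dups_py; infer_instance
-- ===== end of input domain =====

-- B finds each field's duplicates by multiset subtraction (delete one occurrence of every
-- distinct name; the leftovers are the duplicates) instead of A's seen-set generator trick;
-- same return value on Pre_.

-- ===== PORT A =====
-- one generator pass of A: fold over rows with state (seen-set, list of yielded names);
-- 'x[field] in seen or seen.add(x[field])' yields exactly the names already seen
def pvGenPass (rows : List (List (String × String))) (field : String) :
    PySem.Set String × List String :=
  rows.foldl (fun st x =>
      let name := ((PySem.Dict.mk x).get? field).getD ""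
      if PySem.Set.contains st.1 name then (st.1, st.2 ++ [name])
      else (PySem.Set.add st.1 name, st.2))
    (PySem.Set.empty, [])

def get_dups_py (var_file : List (String × List (List (String × String)))) (mapping : String) : List String :=
  let _mapping := ((PySem.Dict.mk var_file).get? mapping).getD []
  let p := pvGenPass _mapping "primary_name"
  let s := pvGenPass _mapping "secondary_name"
  PySem.Set.update (PySem.Set.update PySem.Set.empty (PySem.Set.ofList p.2)) (PySem.Set.ofList s.2)

-- ===== PORT B =====
-- 'for _name in dict.fromkeys(_names): _rest.remove(_name)';
-- remove? is provably some here (each _name occurs in the list), getD only totalizes the step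
def pvRemoveFirsts (ds : List String) (l : List String) : List String :=
  ds.foldl (fun l n => (PySem.List.remove? l n).getD l) l

-- one field of B: the name list minus one occurrence of each distinct name
def pvFieldDups (rows : List (List (String × String))) (field : String) : List String :=
  let names := rows.map (fun x => ((PySem.Dict.mk x).get? field).getD "")
  pvRemoveFirsts (PySem.List.dedup names) names

def get_dups_py_alt (var_file : List (String × List (List (String × String)))) (mapping : String) : List String :=
  let _mapping := ((PySem.Dict.mk var_file).get? mapping).getD []
  ["primary_name", "secondary_name"].foldl
    (fun res field => PySem.Set.update res (pvFieldDups _mapping field)) PySem.Set.empty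

-- ===== PRECONDITION & SPEC =====
-- Pre_ excludes exactly the inputs where A raises: a mapping key absent from var_file
-- (TypeError: iterating None) or a row missing 'primary_name'/'secondary_name' (KeyError).
-- B raises the same exceptions there.
def Pre_get_dups_py (var_file : List (String × List (List (String × String)))) (mapping : String) : Prop :=
  ((PySem.Dict.mk var_file).get? mapping).isSome ∧
  ∀ row ∈ ((PySem.Dict.mk var_file).get? mapping).getD [],
      ((PySem.Dict.mk row).get? "primary_name").isSome ∧ ((PySem.Dict.mk row).get? "secondary_name").isSome
instance (var_file : List (String × List (List (String × String)))) (mapping : String) : Decidable (Pre_get_dups_py var_file mapping) := by unfold Pre_get_dups_py; infer_instance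

def pvWitness_get_dups_py : (List (String × List (List (String × String)))) × String :=
  ([("m", [[("primary_name", "a"), ("secondary_name", "x")],
           [("primary_name", "a"), ("secondary_name", "y")],
           [("primary_name", "b"), ("secondary_name", "y")]])], "m")

def Spec_get_dups_py (var_file : List (String × List (List (String × String)))) (mapping : String) (out : List String) : Prop := out = get_dups_py_alt var_file mapping
instance (var_file : List (String × List (List (String × String)))) (mapping : String) (out : List String) : Decidable (Spec_get_dups_py var_file mapping out) := by unfold Spec_get_dups_py; infer_instance

-- ===== CLAIM (what is proved, stated in full; the proofs are below) =====
def Claim_equal_get_dups_py : Prop := ∀ (var_file : List (String × List (List (String × String)))) (mapping : String), Dom_get_dups_py var_file mapping → Pre_get_dups_py var_file mapping → Spec_get_dups_py var_file mapping (get_dups_py var_file mapping)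

-- ===== LEMMAS AND PROOFS =====

-- the duplicate occurrences of a list, given the names already seen: recursive form of A's pass
def keepDups (seen : PySem.Set String) : List String → List String
  | [] => []
  | n :: rest =>
      if PySem.Set.contains seen n then n :: keepDups seen rest
      else keepDups (PySem.Set.add seen n) rest

-- A's generator pass yields exactly the duplicate occurrences
theorem genPass_eq (field : String) : ∀ (rows : List (List (String × String)))
    (seen : PySem.Set String) (ys : List String),
    (rows.foldl (fun st x =>
        let name := ((PySem.Dict.mk x).get? field).getD ""
        if PySem.Set.contains st.1 name then (st.1, st.2 ++ [name])
        else (PySem.Set.add st.1 name, st.2)) (seen, ys)).2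
      = ys ++ keepDups seen (rows.map (fun x => ((PySem.Dict.mk x).get? field).getD "")) := by
  intro rows
  induction rows with
  | nil => intro seen ys; simp [keepDups]
  | cons row rest ih =>
    intro seen ys
    simp only [List.foldl_cons, List.map_cons]
    by_cases h : PySem.Set.contains seen (((PySem.Dict.mk row).get? field).getD "") = true
    · rw [if_pos h]
      rw [ih, keepDups, if_pos h, List.append_assoc]
      rfl
    · rw [if_neg h]
      rw [ih, keepDups, if_neg h]

-- removing first occurrences of names not equal to the head commutes with the head
theorem removeFirsts_cons_not_mem : ∀ (ds : List String) (n : String) (l : List String),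
    n ∉ ds → pvRemoveFirsts ds (n :: l) = n :: pvRemoveFirsts ds l := by
  intro ds
  induction ds with
  | nil => intro n l _; rfl
  | cons d ds ih =>
    intro n l hn
    have hdn : n ≠ d := fun h => hn (h ▸ List.mem_cons_self)
    unfold pvRemoveFirsts
    simp only [List.foldl_cons]
    rw [PySem.List.remove?_cons_of_ne l hdn]
    cases hr : PySem.List.remove? l d with
    | none => simpa [hr] using ih n l (fun h => hn (List.mem_cons_of_mem _ h))
    | some l' => simpa [hr] using ih n l' (fun h => hn (List.mem_cons_of_mem _ h))

-- main invariant: removing one occurrence of each not-yet-seen distinct name leaves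
-- exactly the duplicate occurrences
theorem removeFirsts_eq_keepDups : ∀ (l : List String) (seen : PySem.Set String),
    pvRemoveFirsts ((PySem.Set.ofList l).filter
      (fun y => !(PySem.Set.contains seen y))) l = keepDups seen l := by
  intro l
  induction l with
  | nil => intro seen; rfl
  | cons n rest ih =>
    intro seen
    rw [PySem.Set.ofList_cons]
    by_cases h : PySem.Set.contains seen n = true
    · -- n is already seen: it is kept on both sides
      rw [keepDups, if_pos h]
      have hfe : (n :: PySem.Set.discard (PySem.Set.ofList rest) n).filter
            (fun y => !(PySem.Set.contains seen y))
          = (PySem.Set.ofList rest).filter (fun y => !(PySem.Set.contains seen y)) := by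
        rw [List.filter_cons,
            if_neg (by simp [(PySem.Set.contains_iff seen n).mp h])]
        unfold PySem.Set.discard
        rw [List.filter_filter]
        apply List.filter_congr
        intro y _
        by_cases hy : PySem.Set.contains seen y = true
        · simp
          intro hys
          exact absurd ((PySem.Set.contains_iff seen y).mp hy) hys
        · have : ¬ (y == n) = true := by
            intro he
            exact hy (by rwa [eq_of_beq he])
          simp [this]
      rw [hfe, removeFirsts_cons_not_mem _ _ _ (by
        intro hmem
        have hns := List.of_mem_filter hmem
        simp at hns
        exact hns ((PySem.Set.contains_iff seen n).mp h)), ih seen]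
    · -- n is new: B removes this first occurrence, A adds it to seen
      rw [keepDups, if_neg h]
      have hfe : (n :: PySem.Set.discard (PySem.Set.ofList rest) n).filter
            (fun y => !(PySem.Set.contains seen y))
          = n :: (PySem.Set.ofList rest).filter
              (fun y => !(PySem.Set.contains (PySem.Set.add seen n) y)) := by
        rw [List.filter_cons,
            if_pos (by simp; exact fun hm => h ((PySem.Set.contains_iff seen n).mpr hm))]
        congr 1
        unfold PySem.Set.discard
        rw [List.filter_filter]
        apply List.filter_congr
        intro y _
        by_cases hyn : y = n
        · subst hyn; simp
        · have h1 : (y == n) = false := by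
            rw [beq_eq_false_iff_ne]; exact hyn
          have h2 : PySem.Set.contains (PySem.Set.add seen n) y = PySem.Set.contains seen y := by
            rw [Bool.eq_iff_iff, PySem.Set.contains_iff, PySem.Set.contains_iff, PySem.Set.mem_add]
            exact or_iff_left hyn
          simp [h1]
          exact fun _ => hyn
      rw [hfe]
      unfold pvRemoveFirsts
      simp only [List.foldl_cons, PySem.List.remove?_cons_self, Option.getD_some]
      exact ih (PySem.Set.add seen n)

-- B's field pass equals A's generator yield list exactly
theorem fieldDups_eq (rows : List (List (String × String))) (field : String) :
    pvFieldDups rows field = (pvGenPass rows field).2 := by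
  unfold pvGenPass
  rw [genPass_eq, List.nil_append]
  show pvRemoveFirsts (PySem.List.dedup _) _ = _
  rw [PySem.List.dedup_eq_ofList, ← removeFirsts_eq_keepDups _ PySem.Set.empty]
  congr 1
  simp [PySem.Set.empty, PySem.Set.contains]

-- s.update(set(l)) = s.update(l)
theorem update_ofList (s : PySem.Set String) (l : List String) :
    PySem.Set.update s (PySem.Set.ofList l) = PySem.Set.update s l := by
  rw [PySem.Set.update_eq_append_filter, PySem.Set.update_eq_append_filter,
      PySem.Set.ofList_ofList]

-- ===== VERDICT =====
theorem get_dups_py_spec : Claim_equal_get_dups_py := by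
  intro var_file mapping _ _
  unfold Spec_get_dups_py get_dups_py get_dups_py_alt
  simp only [List.foldl_cons, List.foldl_nil]
  rw [update_ofList, update_ofList, fieldDups_eq, fieldDups_eq]
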